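-- pv_equiv track=rewrite | github.com/wsethbrown/NeverEndingQuest | module_builder.py | determine_area_type
-- ===== SOURCE A (Python) =====
-- from typing import Dict, List, Any, Optional
--
-- def determine_area_type(region: Dict[str, Any]) -> str:
--     """Determine area type based on region description with better pattern matching"""
--     description = region.get("regionDescription", "").lower()
--     name = region.get("regionName", "").lower()
--
--     # Enhanced pattern matching
--     if any(word in description + name for word in ["mine", "cave", "dungeon", "ruins", "tomb", "underground", "depths"]):
--         return "dungeon"
--     elif any(word in description + name for word in ["town", "city", "village", "settlement", "hollow", "borough"]):
--         return "town"
--     elif any(word in description + name for word in ["forest", "woods", "wilds", "grove", "emerald", "woodland"]):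
--         return "wilderness"
--     elif any(word in description + name for word in ["mountain", "peaks", "marches", "highlands", "cliffs"]):
--         return "wilderness"
--     elif any(word in description + name for word in ["swamp", "marsh", "bog", "mire"]):
--         return "wilderness"
--     else:
--         return "mixed"
-- ===== SOURCE B (Python) =====
-- # Alternative decomposition: a flat keyword->area map is scanned ONCE to collect
-- # the SET of all matched area types; a fixed priority list then resolves the answer.
-- KEYWORD_AREA = {
--     "mine": "dungeon", "cave": "dungeon", "dungeon": "dungeon", "ruins": "dungeon",
--     "tomb": "dungeon", "underground": "dungeon", "depths": "dungeon",
--     "town": "town", "city": "town", "village": "town", "settlement": "town",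
--     "hollow": "town", "borough": "town",
--     "forest": "wilderness", "woods": "wilderness", "wilds": "wilderness",
--     "grove": "wilderness", "emerald": "wilderness", "woodland": "wilderness",
--     "mountain": "wilderness", "peaks": "wilderness", "marches": "wilderness",
--     "highlands": "wilderness", "cliffs": "wilderness",
--     "swamp": "wilderness", "marsh": "wilderness", "bog": "wilderness", "mire": "wilderness",
-- }
--
-- PRIORITY = ("dungeon", "town", "wilderness")
--
--
-- def determine_area_type(region):
--     text = (region.get("regionDescription", "") + region.get("regionName", "")).lower()
--     hits = {area for kw, area in KEYWORD_AREA.items() if kw in text}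
--     for area in PRIORITY:
--         if area in hits:
--             return area
--     return "mixed"
-- ===== Notes on version B (the rewrite author's own statement) =====
-- stated objective: alternative
-- what changed: Instead of short-circuiting through five if/elif branches, B scans a flat keyword-to-area map once to collect the set of all matched area types, then resolves the answer with a fixed priority list (dungeon, town, wilderness) falling back to 'mixed'.
import Mathlib
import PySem

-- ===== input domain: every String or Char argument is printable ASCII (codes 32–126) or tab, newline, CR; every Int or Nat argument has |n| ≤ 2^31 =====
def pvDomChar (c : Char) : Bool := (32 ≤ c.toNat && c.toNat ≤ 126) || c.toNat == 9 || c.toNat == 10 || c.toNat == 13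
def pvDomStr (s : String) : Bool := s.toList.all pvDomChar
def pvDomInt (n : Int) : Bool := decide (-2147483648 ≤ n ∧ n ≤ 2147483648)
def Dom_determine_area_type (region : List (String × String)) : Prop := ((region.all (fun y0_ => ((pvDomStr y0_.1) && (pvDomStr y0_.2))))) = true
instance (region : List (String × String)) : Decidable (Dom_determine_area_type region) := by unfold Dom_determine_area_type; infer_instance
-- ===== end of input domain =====

-- B replaces A's short-circuiting if/elif chain by a flat keyword→area map scanned
-- once to collect the SET of matched area types, resolved by a fixed priority list
-- (objective: alternative decomposition).

-- ===== PORT A =====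
def determine_area_type (region : List (String × String)) : String :=
  let description := PySem.Str.lower ((PySem.Dict.mk region).getD "regionDescription" "")
  let name := PySem.Str.lower ((PySem.Dict.mk region).getD "regionName" "")
  if ["mine", "cave", "dungeon", "ruins", "tomb", "underground", "depths"].any
      (fun w => PySem.Str.isIn w (description ++ name)) then "dungeon"
  else if ["town", "city", "village", "settlement", "hollow", "borough"].any
      (fun w => PySem.Str.isIn w (description ++ name)) then "town"
  else if ["forest", "woods", "wilds", "grove", "emerald", "woodland"].any
      (fun w => PySem.Str.isIn w (description ++ name)) then "wilderness"
  else if ["mountain", "peaks", "marches", "highlands", "cliffs"].any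
      (fun w => PySem.Str.isIn w (description ++ name)) then "wilderness"
  else if ["swamp", "marsh", "bog", "mire"].any
      (fun w => PySem.Str.isIn w (description ++ name)) then "wilderness"
  else "mixed"

-- ===== PORT B =====
def keywordArea : List (String × String) :=
  [("mine", "dungeon"), ("cave", "dungeon"), ("dungeon", "dungeon"), ("ruins", "dungeon"),
   ("tomb", "dungeon"), ("underground", "dungeon"), ("depths", "dungeon"),
   ("town", "town"), ("city", "town"), ("village", "town"), ("settlement", "town"),
   ("hollow", "town"), ("borough", "town"),
   ("forest", "wilderness"), ("woods", "wilderness"), ("wilds", "wilderness"),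
   ("grove", "wilderness"), ("emerald", "wilderness"), ("woodland", "wilderness"),
   ("mountain", "wilderness"), ("peaks", "wilderness"), ("marches", "wilderness"),
   ("highlands", "wilderness"), ("cliffs", "wilderness"),
   ("swamp", "wilderness"), ("marsh", "wilderness"), ("bog", "wilderness"), ("mire", "wilderness")]

def priorityList : List String := ["dungeon", "town", "wilderness"]

-- the 'for area in PRIORITY: if area in hits: return area' loop
def firstHit (hits : PySem.Set String) : List String → String
  | [] => "mixed"
  | a :: rest => if PySem.Set.contains hits a then a else firstHit hits rest

def determine_area_type_alt (region : List (String × String)) : String :=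
  let text := PySem.Str.lower
    ((PySem.Dict.mk region).getD "regionDescription" "" ++ (PySem.Dict.mk region).getD "regionName" "")
  let hits : PySem.Set String :=
    PySem.Set.ofList ((keywordArea.filter (fun p => PySem.Str.isIn p.1 text)).map Prod.snd)
  firstHit hits priorityList

-- ===== PRECONDITION & SPEC =====
def Spec_determine_area_type (region : List (String × String)) (out : String) : Prop := out = determine_area_type_alt region
instance (region : List (String × String)) (out : String) : Decidable (Spec_determine_area_type region out) := by unfold Spec_determine_area_type; infer_instance

-- ===== CLAIM (what is proved, stated in full; the proofs are below) =====
def Claim_equal_determine_area_type : Prop := ∀ (region : List (String × String)), Dom_determine_area_type region → Spec_determine_area_type region (determine_area_type region)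

-- ===== LEMMAS AND PROOFS =====
lemma lower_append (s t : String) :
    PySem.Str.lower (s ++ t) = PySem.Str.lower s ++ PySem.Str.lower t := by
  have h : (PySem.Str.lower (s ++ t)).toList = (PySem.Str.lower s ++ PySem.Str.lower t).toList := by
    simp [PySem.Str.toList_lower, PySem.Chars.lower]
  exact String.toList_inj.mp h

lemma main_eq (text : String) :
    (if ["mine", "cave", "dungeon", "ruins", "tomb", "underground", "depths"].any
        (fun w => PySem.Str.isIn w text) then "dungeon"
     else if ["town", "city", "village", "settlement", "hollow", "borough"].any
        (fun w => PySem.Str.isIn w text) then "town"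
     else if ["forest", "woods", "wilds", "grove", "emerald", "woodland"].any
        (fun w => PySem.Str.isIn w text) then "wilderness"
     else if ["mountain", "peaks", "marches", "highlands", "cliffs"].any
        (fun w => PySem.Str.isIn w text) then "wilderness"
     else if ["swamp", "marsh", "bog", "mire"].any
        (fun w => PySem.Str.isIn w text) then "wilderness"
     else "mixed") =
    firstHit (PySem.Set.ofList
      ((keywordArea.filter (fun p => PySem.Str.isIn p.1 text)).map Prod.snd)) priorityList := by
  cases h1 : (["mine", "cave", "dungeon", "ruins", "tomb", "underground", "depths"] : List String).any
      (fun w => PySem.Str.isIn w text) <;>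
  cases h2 : (["town", "city", "village", "settlement", "hollow", "borough"] : List String).any
      (fun w => PySem.Str.isIn w text) <;>
  cases h3 : (["forest", "woods", "wilds", "grove", "emerald", "woodland"] : List String).any
      (fun w => PySem.Str.isIn w text) <;>
  cases h4 : (["mountain", "peaks", "marches", "highlands", "cliffs"] : List String).any
      (fun w => PySem.Str.isIn w text) <;>
  cases h5 : (["swamp", "marsh", "bog", "mire"] : List String).any
      (fun w => PySem.Str.isIn w text) <;>
    simp_all [firstHit, priorityList, keywordArea, List.any_cons, List.any_nil]

-- ===== VERDICT (by name: the statement is the Claim_ definition above) =====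
theorem determine_area_type_spec : Claim_equal_determine_area_type := by
  intro region _
  simp only [Spec_determine_area_type, determine_area_type, determine_area_type_alt, lower_append]
  exact main_eq _
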